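-- pv_equiv track=rewrite | github.com/miracle-21/algorithm | 프로그래머스/unrated/140108. 문자열 나누기/문자열 나누기.py | solution
-- ===== SOURCE A (Python) =====
-- from collections import deque
--
-- def solution(s):
--     s = deque(map(str,s))
--     first = s.popleft()
--     count1 = 1
--     count2 = 0
--     result = 0
--     while s:
--         try:
--             if first == s.popleft():
--                 count1 += 1
--             else:
--                 count2 += 1
--             if count1 == count2:
--                 result += 1
--                 first = s.popleft()
--                 count1 = 1
--                 count2 = 0
--         except:
--             return result
--     return result+1
-- ===== SOURCE B (Python) =====
-- def solution(s):
--     balance = 0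
--     result = 0
--     for c in s:
--         if balance == 0:
--             first = c
--             result += 1
--         balance += 1 if c == first else -1
--     return result
-- ===== Notes on version B (the rewrite author's own statement) =====
-- stated objective: simpler
-- what changed: B counts group starts with a single running balance (count1-count2 collapsed into one integer) in a plain for-loop over the string, dropping A's deque construction/popleft, two counters, pop-next-as-first step, try/except and the trailing result+1; avoiding the deque and per-char popleft also makes it measurably faster by a constant factor.
import Mathlib
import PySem

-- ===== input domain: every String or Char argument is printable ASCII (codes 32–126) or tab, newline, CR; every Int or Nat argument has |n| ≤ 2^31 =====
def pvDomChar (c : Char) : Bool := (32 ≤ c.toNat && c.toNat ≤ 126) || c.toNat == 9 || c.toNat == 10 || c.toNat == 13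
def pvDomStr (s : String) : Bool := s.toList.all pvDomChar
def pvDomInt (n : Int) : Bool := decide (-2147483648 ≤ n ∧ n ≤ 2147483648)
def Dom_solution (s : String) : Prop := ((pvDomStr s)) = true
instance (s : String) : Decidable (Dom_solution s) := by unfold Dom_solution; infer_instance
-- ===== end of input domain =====

-- B counts group starts with a single running balance, dropping A's deque, two
-- counters, pop-next-as-first step, try/except and trailing result+1 (objective: simpler).

-- ===== PORT A =====
-- A's while loop: state (remaining deque, first, count1, count2, result).
-- The inner 'first = s.popleft()' after 'result += 1' raises when the deque is empty,
-- and the except clause returns the already-incremented result.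
def solLoopA : List Char → Char → Int → Int → Int → Int
  | [], _, _, _, result => result + 1
  | c :: rest, first, count1, count2, result =>
    let count1 := if first == c then count1 + 1 else count1
    let count2 := if first == c then count2 else count2 + 1
    if count1 == count2 then
      match rest with
      | [] => result + 1                       -- popleft raised; except returns result (already +1)
      | f :: rest' => solLoopA rest' f 1 0 (result + 1)
    else
      solLoopA rest first count1 count2 result

def solution (s : String) : Int :=
  match s.toList with
  | [] => 0                                    -- A raises IndexError here; excluded by Pre_solution
  | f :: rest => solLoopA rest f 1 0 0

-- ===== PORT B =====
-- B's for loop: state (balance, first, result). Python's 'first' is only read after it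
-- has been assigned (balance = 0 on the first iteration), so the initial ' ' is never consulted.
def solLoopB : List Char → Int → Char → Int → Int
  | [], _, _, result => result
  | c :: rest, balance, first, result =>
    let first := if balance == 0 then c else first
    let result := if balance == 0 then result + 1 else result
    solLoopB rest (balance + if c == first then 1 else -1) first result

def solution_alt (s : String) : Int := solLoopB s.toList 0 ' ' 0

-- ===== PRECONDITION & SPEC =====
-- Pre_ excludes only the empty string, on which A raises IndexError (popleft of an empty deque).
def Pre_solution (s : String) : Prop := s ≠ ""
instance (s : String) : Decidable (Pre_solution s) := by unfold Pre_solution; infer_instance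
def pvWitness_solution : String := ("aabb")

def Spec_solution (s : String) (out : Int) : Prop := out = solution_alt s
instance (s : String) (out : Int) : Decidable (Spec_solution s out) := by unfold Spec_solution; infer_instance

-- ===== CLAIM (what is proved, stated in full; the proofs are below) =====
def Claim_equal_solution : Prop := ∀ (s : String), Dom_solution s → Pre_solution s → Spec_solution s (solution s)
-- ===== LEMMAS AND PROOFS =====

-- Invariant: at A's loop head (inside a group) B's balance equals count1 - count2 (≥ 1)
-- and B's result is one ahead of A's, the current group having already been counted as started.
theorem solLoop_agree : ∀ (n : Nat) (rest : List Char), rest.length ≤ n →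
    ∀ (first : Char) (count1 count2 result : Int), 1 ≤ count1 - count2 →
      solLoopA rest first count1 count2 result
        = solLoopB rest (count1 - count2) first (result + 1) := by
  intro n
  induction n with
  | zero =>
    intro rest hlen first count1 count2 result h
    have hnil : rest = [] := List.eq_nil_of_length_eq_zero (Nat.le_zero.mp hlen)
    subst hnil
    simp [solLoopA, solLoopB]
  | succ n ih =>
    intro rest hlen first count1 count2 result h
    match rest with
    | [] => simp [solLoopA, solLoopB]
    | c :: rest =>
      have hlen' : rest.length ≤ n := by simpa using hlen
      have hb : (count1 - count2 == 0) = false := by simp; omega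
      rw [solLoopA.eq_def]
      by_cases hc : first = c
      · subst hc
        have hne : (count1 + 1 == count2) = false := by simp; omega
        simp only [solLoopB, beq_self_eq_true, if_true, hb,
          Bool.false_eq_true, if_false, hne]
        have := ih rest hlen' first (count1 + 1) count2 result (by omega)
        rw [this]
        ring_nf
      · have hc2 : (first == c) = false := by simp [hc]
        have hc3 : (c == first) = false := by simp; exact fun e => hc e.symm
        by_cases heq : count1 = count2 + 1
        · have he : (count1 == count2 + 1) = true := by simp [heq]
          simp only [solLoopB, hc2, Bool.false_eq_true, if_false, he, if_true,
            hb, hc3]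
          have hz : count1 - count2 + -1 = 0 := by omega
          rw [hz]
          match rest with
          | [] => simp [solLoopB]
          | f :: rest' =>
            simp only [solLoopB, beq_self_eq_true, if_true]
            have := ih rest' (by simpa using Nat.le_of_succ_le hlen') f 1 0 (result + 1) (by omega)
            simpa using this
        · have he : (count1 == count2 + 1) = false := by simp [heq]
          simp only [solLoopB, hc2, Bool.false_eq_true, if_false, he, hb, hc3]
          have := ih rest hlen' first count1 (count2 + 1) result (by omega)
          rw [this]
          ring_nf

-- ===== VERDICT (by name: the statement is the Claim_ definition above) =====
theorem solution_spec : Claim_equal_solution := by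
  intro s _ hne
  unfold Spec_solution solution solution_alt
  match h : s.toList with
  | [] =>
    exact absurd (String.toList_eq_nil_iff.mp h) hne
  | f :: rest =>
    simp only [solLoopB, beq_self_eq_true, if_true]
    have := solLoop_agree rest.length rest le_rfl f 1 0 0 (by omega)
    simpa using this
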